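-- pv_equiv track=rewrite | github.com/VDanchAI/life-pilot-agent | src/d_brain/services/processor.py | _patch_section_with_cap
-- ===== SOURCE A (Python) =====
-- def _patch_section_with_cap(
--     content: str, header: str, new_item: str, max_items: int = 15,
-- ) -> str:
--     """Add item to markdown list section, evict oldest if over cap."""
--     lines = content.splitlines()
--     section_start: int | None = None
--     item_lines: list[int] = []
--
--     for i, line in enumerate(lines):
--         if section_start is None:
--             if header in line:
--                 section_start = i
--         else:
--             if line.startswith("##") and i > section_start:
--                 break
--             if line.startswith("- "):
--                 item_lines.append(i)
--
--     if section_start is None: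
--         return content
--
--     if len(item_lines) >= max_items and item_lines:
--         del lines[item_lines[0]]
--         # item_lines[0] > section_start always, so section_start unchanged
--
--     lines.insert(section_start + 1, f"- {new_item}")
--     return "\n".join(lines)
-- ===== SOURCE B (Python) =====
-- def _patch_section_with_cap(
--     content: str, header: str, new_item: str, max_items: int = 15,
-- ) -> str:
--     """Add item to markdown list section, evict oldest if over cap."""
--     lines = content.splitlines()
--     sec = next((i for i, ln in enumerate(lines) if header in ln), None)
--     if sec is None:
--         return content
--     body = lines[sec + 1:]
--     stop = next((j for j, ln in enumerate(body) if ln.startswith("##")), len(body))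
--     section = body[:stop]
--     items = [j for j, ln in enumerate(section) if ln.startswith("- ")]
--     if len(items) >= max_items and items:
--         k = items[0]
--         section = section[:k] + section[k + 1:]
--     return "\n".join(lines[:sec + 1] + [f"- {new_item}"] + section + body[stop:])
-- ===== Notes on version B (the rewrite author's own statement) =====
-- stated objective: alternative
-- what changed: A's single interleaved pass (stateful loop that simultaneously looks for the header, collects item-line indices and breaks at the next '##', then mutates the list in place with del/insert) is replaced by a locate-then-slice decomposition: find the header index, find the section end in the tail, take the section as a slice, list the '- ' indices by a comprehension, and rebuild the result by concatenating slices instead of mutating.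
import Mathlib
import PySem

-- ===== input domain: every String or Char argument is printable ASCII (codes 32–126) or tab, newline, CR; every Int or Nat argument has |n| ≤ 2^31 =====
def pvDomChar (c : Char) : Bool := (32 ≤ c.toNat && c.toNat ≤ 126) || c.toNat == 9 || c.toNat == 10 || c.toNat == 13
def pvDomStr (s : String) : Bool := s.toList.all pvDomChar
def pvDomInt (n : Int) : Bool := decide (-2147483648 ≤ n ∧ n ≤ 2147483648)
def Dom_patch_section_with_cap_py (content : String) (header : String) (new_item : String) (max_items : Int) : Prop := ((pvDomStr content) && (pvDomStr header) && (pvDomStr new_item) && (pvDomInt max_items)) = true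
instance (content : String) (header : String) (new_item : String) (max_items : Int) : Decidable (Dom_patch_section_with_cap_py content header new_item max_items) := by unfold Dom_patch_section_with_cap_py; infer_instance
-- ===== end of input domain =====

-- B replaces A's single interleaved stateful scan + in-place del/insert by a
-- locate-then-slice decomposition rebuilding the result from slices (objective: alternative).

-- ===== PORT A =====
-- the single for-loop of A: state = (section_start, item_lines), early break at '##'
def pvALoop (header : String) : List (Int × String) → Option Int → List Int → Option Int × List Int
  | [], sec, items => (sec, items)
  | (i, line) :: rest, sec, items =>
    match sec with
    | none =>
      if PySem.Str.isIn header line then pvALoop header rest (some i) items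
      else pvALoop header rest none items
    | some s =>
      if PySem.Str.startswith line "##" && decide (s < i) then (some s, items)
      else if PySem.Str.startswith line "- " then pvALoop header rest (some s) (items ++ [i])
      else pvALoop header rest (some s) items

def patch_section_with_cap_py (content : String) (header : String) (new_item : String) (max_items : Int) : String :=
  let lines := PySem.Str.splitlines content
  match pvALoop header (PySem.List.enumerate lines 0) none [] with
  | (none, _) => content
  | (some s, items) =>
    let lines2 :=
      if decide ((items.length : Int) ≥ max_items) && !items.isEmpty then
        -- del lines[item_lines[0]]  (item_lines[0] is always a valid index here)
        match PySem.List.pop? lines (items.headD 0) with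
        | some r => r.2
        | none => lines
      else lines
    PySem.Str.join "\n" (PySem.List.insert lines2 (s + 1) (String.append "- " new_item))

-- ===== PORT B =====
-- next((i for i, ln in enumerate(xs) if p(ln)), None), carrying the running index
def pvNextIdx (p : String → Bool) : List String → Int → Option Int
  | [], _ => none
  | l :: ls, i => if p l then some i else pvNextIdx p ls (i + 1)

def patch_section_with_cap_py_alt (content : String) (header : String) (new_item : String) (max_items : Int) : String :=
  let lines := PySem.Str.splitlines content
  match pvNextIdx (fun ln => PySem.Str.isIn header ln) lines 0 with
  | none => content
  | some sec =>
    let body := PySem.List.slice lines (some (sec + 1)) none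
    let stop := (pvNextIdx (fun ln => PySem.Str.startswith ln "##") body 0).getD (body.length : Int)
    let sect := PySem.List.slice body none (some stop)
    let items := ((PySem.List.enumerate sect 0).filter (fun q => PySem.Str.startswith q.2 "- ")).map (·.1)
    let sect2 :=
      if decide ((items.length : Int) ≥ max_items) && !items.isEmpty then
        let k := items.headD 0
        PySem.List.slice sect none (some k) ++ PySem.List.slice sect (some (k + 1)) none
      else sect
    PySem.Str.join "\n"
      (PySem.List.slice lines none (some (sec + 1)) ++ [String.append "- " new_item] ++ sect2
        ++ PySem.List.slice body (some stop) none)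

-- ===== PRECONDITION & SPEC =====
def Spec_patch_section_with_cap_py (content : String) (header : String) (new_item : String) (max_items : Int) (out : String) : Prop := out = patch_section_with_cap_py_alt content header new_item max_items
instance (content : String) (header : String) (new_item : String) (max_items : Int) (out : String) : Decidable (Spec_patch_section_with_cap_py content header new_item max_items out) := by unfold Spec_patch_section_with_cap_py; infer_instance

-- ===== CLAIM (what is proved, stated in full; the proofs are below) =====
def Claim_equal_patch_section_with_cap_py : Prop := ∀ (content : String) (header : String) (new_item : String) (max_items : Int), Dom_patch_section_with_cap_py content header new_item max_items → Spec_patch_section_with_cap_py content header new_item max_items (patch_section_with_cap_py content header new_item max_items)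

-- ===== LEMMAS AND PROOFS =====

-- B's `next` helper is findIdx? with an offset
theorem pvNextIdx_eq (p : String → Bool) (xs : List String) (i : Int) :
    pvNextIdx p xs i = (List.findIdx? p xs).map (fun n => i + (n : Int)) := by
  induction xs generalizing i with
  | nil => simp [pvNextIdx]
  | cons l ls ih =>
    by_cases h : p l
    · simp [pvNextIdx, h, List.findIdx?_cons]
    · cases hf : List.findIdx? p ls
      all_goals simp [pvNextIdx, h, List.findIdx?_cons, hf, ih]
      all_goals ring_nf

-- enumerate with a shifted start
theorem enumerate_shift (xs : List String) (c i : Int) :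
    PySem.List.enumerate xs (c + i) = (PySem.List.enumerate xs i).map (fun q => (c + q.1, q.2)) := by
  induction xs generalizing i with
  | nil => simp [PySem.List.enumerate_nil]
  | cons l ls ih =>
    rw [PySem.List.enumerate_cons, PySem.List.enumerate_cons]
    simp only [List.map_cons]
    rw [show c + i + 1 = c + (i + 1) by ring, ih]

-- first index of a '##' line in the tail (section end), as a Nat
def pvStopN (xs : List String) : Nat :=
  (List.findIdx? (fun ln => PySem.Chars.startswith ln.toList ['#', '#']) xs).getD xs.length

theorem pvStopN_le (xs : List String) : pvStopN xs ≤ xs.length := by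
  unfold pvStopN
  cases hf : List.findIdx? (fun ln => PySem.Chars.startswith ln.toList ['#', '#']) xs with
  | none => simp
  | some n =>
    have := List.findIdx?_eq_some_iff_findIdx_eq.mp hf
    simp
    omega

-- phase 2 of A's loop: after the header was found at s, the loop collects the
-- indices of '- ' lines of the section (up to the first '##' line)
theorem pvALoop_phase2 (header : String) (xs : List String) (s i : Int) (acc : List Int)
    (hs : s < i) :
    pvALoop header (PySem.List.enumerate xs i) (some s) acc =
      (some s, acc ++ ((PySem.List.enumerate (xs.take (pvStopN xs)) i).filter
        (fun q => PySem.Str.startswith q.2 "- ")).map (·.1)) := by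
  induction xs generalizing i acc with
  | nil => simp [PySem.List.enumerate_nil, pvALoop, pvStopN]
  | cons l ls ih =>
    rw [PySem.List.enumerate_cons]
    by_cases hh : PySem.Chars.startswith l.toList ['#', '#']
    · have hstop : pvStopN (l :: ls) = 0 := by simp [pvStopN, List.findIdx?_cons, hh]
      simp [pvALoop, hh, hs, hstop]
    · have hstop : pvStopN (l :: ls) = pvStopN ls + 1 := by
        unfold pvStopN
        rw [List.findIdx?_cons]
        cases List.findIdx? (fun ln => PySem.Chars.startswith ln.toList ['#', '#']) ls <;>
          simp [hh]
      rw [hstop]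
      by_cases hd : PySem.Chars.startswith l.toList ['-', ' ']
      · rw [show pvALoop header ((i, l) :: PySem.List.enumerate ls (i + 1)) (some s) acc
              = pvALoop header (PySem.List.enumerate ls (i + 1)) (some s) (acc ++ [i]) by
            simp [pvALoop, hh, hd]]
        rw [ih (i + 1) (acc ++ [i]) (by omega)]
        simp [PySem.List.enumerate_cons, hd]
      · rw [show pvALoop header ((i, l) :: PySem.List.enumerate ls (i + 1)) (some s) acc
              = pvALoop header (PySem.List.enumerate ls (i + 1)) (some s) acc by
            simp [pvALoop, hh, hd]]
        rw [ih (i + 1) acc (by omega)]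
        simp [PySem.List.enumerate_cons, hd]

-- phase 1: the loop before the header is found
theorem pvALoop_phase1 (header : String) (xs : List String) (i : Int) (n : Nat)
    (hf : List.findIdx? (fun ln => PySem.Chars.isIn header.toList ln.toList) xs = some n) :
    pvALoop header (PySem.List.enumerate xs i) none [] =
      pvALoop header (PySem.List.enumerate (xs.drop (n + 1)) (i + n + 1)) (some (i + n)) [] := by
  induction xs generalizing i n with
  | nil => simp at hf
  | cons l ls ih =>
    rw [PySem.List.enumerate_cons]
    by_cases h : PySem.Chars.isIn header.toList l.toList
    · rw [List.findIdx?_cons] at hf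
      simp [h] at hf
      subst hf
      simp [pvALoop, h]
    · rw [List.findIdx?_cons] at hf
      simp [h] at hf
      obtain ⟨m, hm, rfl⟩ := hf
      rw [show pvALoop header ((i, l) :: PySem.List.enumerate ls (i + 1)) none []
            = pvALoop header (PySem.List.enumerate ls (i + 1)) none [] by simp [pvALoop, h]]
      rw [ih (i + 1) m hm]
      have e1 : (i : Int) + ((m : Int) + 1) + 1 = i + 1 + (m : Int) + 1 := by ring
      have e2 : (i : Int) + ((m : Int) + 1) = i + 1 + (m : Int) := by ring
      push_cast
      rw [e1, e2, List.drop_succ_cons]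

theorem pvALoop_none (header : String) (xs : List String) (i : Int)
    (hf : List.findIdx? (fun ln => PySem.Chars.isIn header.toList ln.toList) xs = none) :
    pvALoop header (PySem.List.enumerate xs i) none [] = (none, []) := by
  induction xs generalizing i with
  | nil => simp [PySem.List.enumerate_nil, pvALoop]
  | cons l ls ih =>
    rw [List.findIdx?_cons] at hf
    by_cases h : PySem.Chars.isIn header.toList l.toList
    · simp [h] at hf
    · rw [PySem.List.enumerate_cons]
      rw [show pvALoop header ((i, l) :: PySem.List.enumerate ls (i + 1)) none []
            = pvALoop header (PySem.List.enumerate ls (i + 1)) none [] by simp [pvALoop, h]]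
      refine ih (i + 1) ?_
      simp [h] at hf
      simp [List.findIdx?_eq_none_iff]
      exact hf

-- shifting the enumeration start only shifts the collected indices
theorem pvItems_shift (xs : List String) (c : Int) :
    ((PySem.List.enumerate xs c).filter (fun q => PySem.Str.startswith q.2 "- ")).map (·.1)
      = (((PySem.List.enumerate xs 0).filter (fun q => PySem.Str.startswith q.2 "- ")).map
          (·.1)).map (fun j => c + j) := by
  conv_lhs => rw [show c = c + 0 by ring, enumerate_shift]
  simp only [List.filter_map, List.map_map]
  rfl

-- stop index of B equals pvStopN
theorem pvStop_eq (xs : List String) :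
    (pvNextIdx (fun ln => PySem.Str.startswith ln "##") xs 0).getD ((xs.length : Int))
      = (pvStopN xs : Int) := by
  rw [pvNextIdx_eq]
  unfold pvStopN
  simp only [PySem.Str.startswith_eq, show "##".toList = ['#', '#'] from rfl]
  cases List.findIdx? (fun ln => PySem.Chars.startswith ln.toList ['#', '#']) xs <;> simp

-- list surgery: delete inside the section, then insert right after the header
theorem pvReassemble {α : Type} (L : List α) (v : α) (n kn stopN : Nat)
    (h1 : n + 1 + kn < L.length) (h2 : kn + 1 ≤ stopN) :
    List.take (n + 1) (L.eraseIdx (n + 1 + kn)) ++ v :: List.drop (n + 1) (L.eraseIdx (n + 1 + kn))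
      = List.take (n + 1) L ++ v ::
        (((L.drop (n + 1)).take stopN).take kn ++
          (((L.drop (n + 1)).take stopN).drop (kn + 1) ++ (L.drop (n + 1)).drop stopN)) := by
  rw [List.eraseIdx_eq_take_drop_succ]
  rw [List.take_append, List.drop_append]
  rw [List.length_take]
  rw [show min (n + 1 + kn) L.length = n + 1 + kn by omega]
  rw [List.take_take]
  rw [show min (n + 1) (n + 1 + kn) = n + 1 by omega]
  rw [show n + 1 - (n + 1 + kn) = 0 by omega]
  simp only [List.take_zero, List.drop_zero, List.append_nil]
  rw [List.drop_take]
  rw [show n + 1 + kn - (n + 1) = kn by omega]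
  rw [List.take_take, min_eq_left (by omega : kn ≤ stopN)]
  congr 3
  rw [List.drop_take]
  rw [show List.drop stopN (List.drop (n + 1) L)
        = List.drop (stopN - (kn + 1)) (List.drop (kn + 1) (List.drop (n + 1) L)) by
      conv_rhs => rw [List.drop_drop]
      congr 1
      omega]
  rw [List.take_append_drop]
  rw [List.drop_drop]
  congr 1

-- ===== VERDICT (by name: the statement is the Claim_ definition above) =====
theorem patch_section_with_cap_py_spec : Claim_equal_patch_section_with_cap_py := by
  intro content header new_item max_items _hdom
  unfold Spec_patch_section_with_cap_py patch_section_with_cap_py patch_section_with_cap_py_alt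
  simp only []
  cases hub : List.findIdx? (fun ln => PySem.Chars.isIn header.toList ln.toList)
      (PySem.Str.splitlines content) with
  | none =>
    rw [pvALoop_none header _ 0 hub, pvNextIdx_eq]
    simp only [PySem.Str.isIn_eq]
    rw [hub]
    simp
  | some n =>
    set L := PySem.Str.splitlines content with hdefL
    have hn : n < L.length := by
      have h := List.findIdx?_eq_some_iff_findIdx_eq.mp hub
      omega
    rw [pvALoop_phase1 header L 0 n hub]
    rw [pvALoop_phase2 header _ (0 + (n : Int)) (0 + (n : Int) + 1) [] (by omega)]
    rw [pvNextIdx_eq]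
    simp only [PySem.Str.isIn_eq]
    rw [hub]
    simp only [Option.map_some, Option.bind_some, Option.pure_def, Option.bind_eq_bind,
      List.nil_append, zero_add]
    rw [show ((n : Int) + 1) = ((n + 1 : Nat) : Int) by push_cast; ring]
    rw [PySem.List.slice_from_natCast, PySem.List.slice_to_natCast, pvStop_eq,
      PySem.List.slice_to_natCast]
    rw [pvItems_shift]
    rw [PySem.List.slice_from_natCast]
    set body := List.drop (n + 1) L with hbody
    set stopN := pvStopN body with hstopdef
    set sect := List.take stopN body with hsect
    set items0 := List.map (fun x => x.1)
      (List.filter (fun q => PySem.Str.startswith q.2 "- ") (PySem.List.enumerate sect))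
      with hitems0
    have hstople : stopN ≤ body.length := pvStopN_le body
    have hsectlen : sect.length = stopN := by
      rw [hsect, List.length_take]
      omega
    have hLlen : L.length = n + 1 + body.length := by
      rw [hbody, List.length_drop]
      omega
    simp only [List.length_map, List.isEmpty_map]
    by_cases hcond : (decide ((items0.length : Int) ≥ max_items) && !items0.isEmpty) = true
    · rw [if_pos hcond, if_pos hcond]
      have hne : items0 ≠ [] := by
        rcases Bool.and_eq_true_iff.mp hcond with ⟨-, h2⟩
        simpa using h2
      obtain ⟨j, t, hI⟩ := List.exists_cons_of_ne_nil hne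
      have hj : ∃ kn : Nat, j = (kn : Int) ∧ kn < sect.length := by
        have hjmem : j ∈ items0 := by rw [hI]; exact List.mem_cons_self
        rw [hitems0] at hjmem
        obtain ⟨q, hq, rfl⟩ := List.mem_map.mp hjmem
        obtain ⟨kn, hkn, rfl⟩ := (PySem.List.mem_enumerate_iff _ _ _).mp (List.mem_of_mem_filter hq)
        exact ⟨kn, by simp, hkn⟩
      obtain ⟨kn, rfl, hknlt⟩ := hj
      have hknstop : kn + 1 ≤ stopN := by omega
      have hbound : n + 1 + kn < L.length := by omega
      rw [hI]
      simp only [List.map_cons, List.headD_cons]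
      rw [show ((n + 1 : Nat) : Int) + (kn : Int) = ((n + 1 + kn : Nat) : Int) by push_cast; ring]
      rw [PySem.List.pop?_natCast L (n + 1 + kn) hbound]
      rw [show ((kn : Int) + 1) = ((kn + 1 : Nat) : Int) by push_cast; ring]
      rw [PySem.List.slice_to_natCast, PySem.List.slice_from_natCast]
      have hleni : n + 1 ≤ (L.eraseIdx (n + 1 + kn)).length := by
        rw [List.length_eraseIdx_of_lt hbound]
        omega
      rw [PySem.List.insert_natCast _ (n + 1) _ hleni]
      rw [pvReassemble L ("- ".append new_item) n kn stopN hbound hknstop]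
      simp only [List.append_assoc, List.cons_append, List.nil_append]
      rw [hsect, hbody]
    · rw [if_neg hcond, if_neg hcond]
      have hle : n + 1 ≤ L.length := by omega
      rw [PySem.List.insert_natCast _ (n + 1) _ hle]
      simp only [List.append_assoc, List.cons_append, List.nil_append]
      rw [hsect, List.take_append_drop, ← hbody]
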